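-- pv_equiv track=rewrite | github.com/heogeon0/- | 구현/프로그래머스_삼각달팽이.py | solution
-- ===== SOURCE A (Python) =====
-- delta = [[1,0],[0,1],[-1,-1]]
--
-- def solution(n):
--     arr = [[0] * n for _ in range(n)]
--     ni = nj = d = 0
--
--     num = 1
--     while True:
--         arr[ni][nj] = num
--         num += 1
--         cnt = 0
--         while cnt<3:
--             if 0<=ni+delta[d][0]<n and 0<=nj+delta[d][1]<n and arr[ni+delta[d][0]][nj+delta[d][1]]==0:
--                 ni += delta[d][0]
--                 nj += delta[d][1]
--                 break
--             else:
--                 d = d+1 if d+1<3 else 0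
--                 cnt += 1
--
--         if cnt == 3: break
--
--     answer = []
--     for r in range(n):
--         for c in range(r+1):
--             answer.append(arr[r][c])
--
--     return answer
-- ===== SOURCE B (Python) =====
-- def solution(n):
--     tri = [[0] * (r + 1) for r in range(n)]
--     dirs = [(1, 0), (0, 1), (-1, -1)]
--     i = j = 0
--     num = 1
--     for k in range(n):
--         di, dj = dirs[k % 3]
--         for _ in range(n - k):
--             tri[i][j] = num
--             num += 1
--             i += di
--             j += dj
--         di2, dj2 = dirs[(k + 1) % 3]
--         i += di2 - di
--         j += dj2 - dj
--     return [x for row in tri for x in row]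
-- ===== Notes on version B (the rewrite author's own statement) =====
-- stated objective: simpler
-- what changed: B replaces A's cell-by-cell walk with turn detection by probing neighbouring grid cells for zero (plus A's final blind wander into the unused upper-triangle region of its square grid) by direct leg decomposition: legs of decreasing length whose directions cycle down / right / up-left, written straight into a jagged triangle with no collision checks and no square grid.
-- crash fix: For non-positive n, A raises IndexError (it writes into an empty grid before any bounds check) while B returns an empty list. — e.g. on solution(0): A raises IndexError, B returns []
import Mathlib
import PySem

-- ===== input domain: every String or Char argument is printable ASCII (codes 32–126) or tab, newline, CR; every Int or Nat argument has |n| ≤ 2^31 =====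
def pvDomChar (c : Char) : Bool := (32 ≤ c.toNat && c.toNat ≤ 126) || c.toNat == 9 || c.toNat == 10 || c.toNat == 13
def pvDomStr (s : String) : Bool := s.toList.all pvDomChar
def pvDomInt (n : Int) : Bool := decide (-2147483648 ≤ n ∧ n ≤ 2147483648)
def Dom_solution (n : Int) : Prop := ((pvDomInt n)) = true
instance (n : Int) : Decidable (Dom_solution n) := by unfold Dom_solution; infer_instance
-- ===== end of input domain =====

-- B replaces A's cell-by-cell walk (turns found by probing for zero cells on a square
-- grid) by a direct decomposition into n legs of lengths n, n-1, …, 1 whose directions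
-- cycle through (1,0),(0,1),(-1,-1), written into a jagged triangle with no collision
-- checks; same return value on every n ≥ 1 (neither mutates its argument).

-- ===== PORT A =====
-- shared transliteration helpers for Python's `x[i][j]` read / `x[i][j] = v` write
-- (exact for 0 ≤ i < len x, 0 ≤ j < len (x[i]), which holds wherever the ports evaluate them)
def g2get (g : List (List Int)) (i j : Int) : Int := (g.getD i.toNat []).getD j.toNat 0
def g2set (g : List (List Int)) (i j : Int) (v : Int) : List (List Int) :=
  g.set i.toNat ((g.getD i.toNat []).set j.toNat v)

def delta : List (List Int) := [[1, 0], [0, 1], [-1, -1]]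
def deltaI (d : Nat) : Int := (delta.getD d []).getD 0 0
def deltaJ (d : Nat) : Int := (delta.getD d []).getD 1 0

-- the condition of A's inner `if` (short-circuit order irrelevant: every sub-test is total here)
def tryOk (arr : List (List Int)) (n ni nj : Int) (d : Nat) : Bool :=
  decide (0 ≤ ni + deltaI d) && decide (ni + deltaI d < n) &&
  decide (0 ≤ nj + deltaJ d) && decide (nj + deltaJ d < n) &&
  decide (g2get arr (ni + deltaI d) (nj + deltaJ d) = 0)

-- A's inner `while cnt < 3` loop: fuel = 3 - cnt; returns the moved-to position and
-- direction, or none when cnt reaches 3 (the outer break)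
def innerA (arr : List (List Int)) (n ni nj : Int) (d : Nat) (fuel : Nat) :
    Option (Int × Int × Nat) :=
  match fuel with
  | 0 => none
  | f + 1 =>
    if tryOk arr n ni nj d then some (ni + deltaI d, nj + deltaJ d, d)
    else innerA arr n ni nj (if d + 1 < 3 then d + 1 else 0) f

-- A's outer `while True` loop; the fuel n²+1 strictly exceeds the number of iterations
-- the Python loop performs (each iteration past the first enters a previously-zero cell)
def loopA (n : Int) : Nat → List (List Int) → Int → Int → Nat → Int → List (List Int)
  | 0, arr, _, _, _, _ => arr
  | fuel + 1, arr, ni, nj, d, num =>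
    let arr1 := g2set arr ni nj num
    match innerA arr1 n ni nj d 3 with
    | some (ni', nj', d') => loopA n fuel arr1 ni' nj' d' (num + 1)
    | none => arr1

def solution (n : Int) : List Int :=
  let N := n.toNat
  let arr := loopA n (N * N + 1) (List.replicate N (List.replicate N 0)) 0 0 0 1
  (List.range N).flatMap
    (fun r : Nat => (List.range (r + 1)).map (fun c : Nat => g2get arr (r : Int) (c : Int)))

-- ===== PORT B =====
def solution_alt (n : Int) : List Int :=
  let N := n.toNat
  let tri0 : List (List Int) := (List.range N).map (fun r => List.replicate (r + 1) 0)
  let dirs : List (Int × Int) := [(1, 0), (0, 1), (-1, -1)]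
  let st := (List.range N).foldl
    (fun (s : List (List Int) × Int × Int × Int) k =>
      let (tri, i, j, num) := s
      let dd := dirs.getD (k % 3) (0, 0)
      let s2 := (List.range (N - k)).foldl
        (fun (s : List (List Int) × Int × Int × Int) _ =>
          let (tri, i, j, num) := s
          (g2set tri i j num, i + dd.1, j + dd.2, num + 1)) (tri, i, j, num)
      let (tri, i, j, num) := s2
      let dd2 := dirs.getD ((k + 1) % 3) (0, 0)
      (tri, i + dd2.1 - dd.1, j + dd2.2 - dd.2, num)) (tri0, 0, 0, 1)
  st.1.flatMap (fun row => row)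

-- ===== PRECONDITION & SPEC =====
-- Pre_ excludes exactly n ≤ 0, where the Python A raises IndexError (it writes
-- arr[0][0] into an empty grid before any bounds check).
def Pre_solution (n : Int) : Prop := 1 ≤ n
instance (n : Int) : Decidable (Pre_solution n) := by unfold Pre_solution; infer_instance
def pvWitness_solution : Int := 4

-- For n ≤ 0, A raises IndexError while B returns [].
def Raises_solution (n : Int) : Prop := n ≤ 0
instance (n : Int) : Decidable (Raises_solution n) := by unfold Raises_solution; infer_instance
def pvRaiseWitness_solution : Int := 0
def pvRaiseWitnessOut_solution : List Int := []

def Spec_solution (n : Int) (out : List Int) : Prop := out = solution_alt n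
instance (n : Int) (out : List Int) : Decidable (Spec_solution n out) := by
  unfold Spec_solution; infer_instance

-- ===== CLAIM (what is proved, stated in full; the proofs are below) =====
def Claim_equal_solution : Prop := ∀ (n : Int), Dom_solution n → Pre_solution n → Spec_solution n (solution n)
def Claim_raises_solution : Prop := (∀ (n : Int), Dom_solution n → Raises_solution n → ¬ Pre_solution n) ∧ (Dom_solution (pvRaiseWitness_solution) ∧ Raises_solution (pvRaiseWitness_solution) ∧ solution_alt (pvRaiseWitness_solution) = pvRaiseWitnessOut_solution)

-- ===== LEMMAS AND PROOFS =====

-- ---- the canonical leg decomposition (proof-side closed forms) ----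

-- direction of leg k
def dI (k : Nat) : Int := if k % 3 = 0 then 1 else if k % 3 = 1 then 0 else -1
def dJ (k : Nat) : Int := if k % 3 = 0 then 0 else if k % 3 = 1 then 1 else -1

-- cell t of leg k of the size-N spiral (closed form; m = k/3 is the "layer")
def cellI (N k t : Nat) : Int :=
  if k % 3 = 0 then 2 * (k / 3 : Nat) + t
  else if k % 3 = 1 then (N : Int) - 1 - (k / 3 : Nat)
  else (N : Int) - 2 - (k / 3 : Nat) - t
def cellJ (N k t : Nat) : Int :=
  if k % 3 = 0 then (k / 3 : Nat)
  else if k % 3 = 1 then (k / 3 : Nat) + 1 + t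
  else (N : Int) - 2 - 2 * (k / 3 : Nat) - t

-- number of cells written before leg k starts
def cb (N : Nat) : Nat → Nat
  | 0 => 0
  | k + 1 => cb N k + (N - k)

def wr (N k t : Nat) : (Int × Int) × Int := ((cellI N k t, cellJ N k t), (cb N k + t + 1 : Int))
def legW (N k : Nat) : List ((Int × Int) × Int) := (List.range (N - k)).map (wr N k)
def writesU (N k t : Nat) : List ((Int × Int) × Int) :=
  (List.range k).flatMap (legW N) ++ (List.range t).map (wr N k)
def writesAll (N : Nat) : List ((Int × Int) × Int) := (List.range N).flatMap (legW N)

def appW (g : List (List Int)) (w : (Int × Int) × Int) : List (List Int) :=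
  g2set g w.1.1 w.1.2 w.2
def foldW (g : List (List Int)) (ws : List ((Int × Int) × Int)) : List (List Int) :=
  ws.foldl appW g
def sqG (N : Nat) : List (List Int) := List.replicate N (List.replicate N 0)
def triG (N : Nat) : List (List Int) := (List.range N).map (fun r => List.replicate (r + 1) 0)

theorem cb_succ (N k : Nat) : cb N (k + 1) = cb N k + (N - k) := rfl

theorem cb_mono (N : Nat) {k k' : Nat} (h : k ≤ k') : cb N k ≤ cb N k' := by
  induction k' with
  | zero => simp [show k = 0 from by omega]
  | succ m ih =>
    rcases Nat.eq_or_lt_of_le h with rfl|h'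
    · exact Nat.le_refl _
    · have := ih (by omega); rw [cb_succ]; omega

theorem cb_le (N k : Nat) (h : k ≤ N) : cb N k ≤ N * k := by
  induction k with
  | zero => simp [cb]
  | succ m ih => rw [Nat.mul_succ, cb_succ]; have := ih (by omega); omega

theorem cb_lt_total (N k t : Nat) (hk : k < N) (ht : t < N - k) :
    cb N k + t < cb N N := by
  have h1 : cb N (k+1) ≤ cb N N := cb_mono N (by omega)
  rw [cb_succ] at h1; omega

theorem cell_bounds (N k t : Nat) (hk : k < N) (ht : t < N - k) :
    0 ≤ cellJ N k t ∧ cellJ N k t ≤ cellI N k t ∧ cellI N k t < (N : Int) := by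
  have h3 : k % 3 = 0 ∨ k % 3 = 1 ∨ k % 3 = 2 := by omega
  rcases h3 with h|h|h <;> simp [cellI, cellJ, h] <;> omega

theorem cell_inj (N k t k' t' : Nat) (hk : k < N) (ht : t < N - k)
    (hk' : k' < N) (ht' : t' < N - k')
    (hI : cellI N k t = cellI N k' t') (hJ : cellJ N k t = cellJ N k' t') :
    k = k' ∧ t = t' := by
  have h3 : k % 3 = 0 ∨ k % 3 = 1 ∨ k % 3 = 2 := by omega
  have h3' : k' % 3 = 0 ∨ k' % 3 = 1 ∨ k' % 3 = 2 := by omega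
  rcases h3 with h|h|h <;> rcases h3' with h'|h'|h' <;>
    simp [cellI, cellJ, h, h'] at hI hJ <;> omega

theorem cell_cover (N : Nat) (r c : Int) (hc : 0 ≤ c) (hrc : c ≤ r) (hr : r < (N : Int)) :
    ∃ k t, k < N ∧ t < N - k ∧ cellI N k t = r ∧ cellJ N k t = c := by
  obtain ⟨C, hC⟩ : ∃ C : Nat, c = (C : Int) := ⟨c.toNat, by omega⟩
  obtain ⟨R, hR⟩ : ∃ R : Nat, r = (R : Int) := ⟨r.toNat, by omega⟩
  subst hC hR
  by_cases h1 : C ≤ R - C ∧ C ≤ N - 1 - R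
  · refine ⟨3 * C, R - 2 * C, by omega, by omega, ?_, ?_⟩ <;>
      simp [cellI, cellJ, show (3*C) % 3 = 0 by omega, show (3*C) / 3 = C by omega] <;> omega
  · by_cases h2 : N - 1 - R ≤ C ∧ N - 1 - R ≤ R - C
    · refine ⟨3 * (N - 1 - R) + 1, C - (N - 1 - R) - 1, by omega, by omega, ?_, ?_⟩ <;>
        simp [cellI, cellJ, show (3*(N-1-R)+1) % 3 = 1 by omega,
              show (3*(N-1-R)+1) / 3 = N - 1 - R by omega] <;> omega
    · refine ⟨3 * (R - C) + 2, N - 2 - (R - C) - R, by omega, by omega, ?_, ?_⟩ <;>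
        simp [cellI, cellJ, show (3*(R-C)+2) % 3 = 2 by omega,
              show (3*(R-C)+2) / 3 = R - C by omega] <;> omega

theorem cell_step (N k t : Nat) :
    cellI N k (t + 1) = cellI N k t + dI k ∧ cellJ N k (t + 1) = cellJ N k t + dJ k := by
  have h3 : k % 3 = 0 ∨ k % 3 = 1 ∨ k % 3 = 2 := by omega
  rcases h3 with h|h|h <;> simp [cellI, cellJ, dI, dJ, h] <;> omega

theorem cell_leg_step (N k : Nat) (hk : k < N) :
    cellI N (k + 1) 0 = cellI N k (N - k - 1) + dI (k + 1) ∧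
    cellJ N (k + 1) 0 = cellJ N k (N - k - 1) + dJ (k + 1) := by
  have h3 : k % 3 = 0 ∨ k % 3 = 1 ∨ k % 3 = 2 := by omega
  rcases h3 with h|h|h <;>
    simp [cellI, cellJ, dI, dJ, h, show (k+1) % 3 = (k % 3 + 1) % 3 by omega] <;>
    constructor <;> omega

theorem cell_overshoot (N k : Nat) (h2 : 2 ≤ k) (hk : k < N) :
    cellI N (k - 2) 0 = cellI N k (N - k - 1) + dI k ∧
    cellJ N (k - 2) 0 = cellJ N k (N - k - 1) + dJ k := by
  have h3 : k % 3 = 0 ∨ k % 3 = 1 ∨ k % 3 = 2 := by omega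
  rcases h3 with h|h|h <;>
    simp [cellI, cellJ, dI, dJ, h, show (k-2) % 3 = (k % 3 + 1) % 3 by omega] <;>
    constructor <;> omega

theorem deltaI_mod (k : Nat) : deltaI (k % 3) = dI k := by
  have h3 : k % 3 = 0 ∨ k % 3 = 1 ∨ k % 3 = 2 := by omega
  rcases h3 with h|h|h <;> rw [h] <;> simp [deltaI, delta, dI, h]
theorem deltaJ_mod (k : Nat) : deltaJ (k % 3) = dJ k := by
  have h3 : k % 3 = 0 ∨ k % 3 = 1 ∨ k % 3 = 2 := by omega
  rcases h3 with h|h|h <;> rw [h] <;> simp [deltaJ, delta, dJ, h]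

-- membership characterisation of the write prefix
theorem mem_writesU (N k t : Nat) (w : (Int × Int) × Int) :
    w ∈ writesU N k t ↔
      ∃ k' t', ((k' < k ∧ t' < N - k') ∨ (k' = k ∧ t' < t)) ∧ w = wr N k' t' := by
  simp only [writesU, legW, List.mem_append, List.mem_flatMap, List.mem_map, List.mem_range]
  constructor
  · rintro (⟨k', hk', t', ht', rfl⟩ | ⟨t', ht', rfl⟩)
    · exact ⟨k', t', Or.inl ⟨hk', ht'⟩, rfl⟩
    · exact ⟨k, t', Or.inr ⟨rfl, ht'⟩, rfl⟩
  · rintro ⟨k', t', (⟨hk', ht'⟩ | ⟨rfl, ht'⟩), rfl⟩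
    · exact Or.inl ⟨k', hk', t', ht', rfl⟩
    · exact Or.inr ⟨t', ht', rfl⟩
theorem mem_writesAll (N : Nat) (w : (Int × Int) × Int) :
    w ∈ writesAll N ↔ ∃ k' t', k' < N ∧ t' < N - k' ∧ w = wr N k' t' := by
  simp only [writesAll, legW, List.mem_flatMap, List.mem_map, List.mem_range]
  constructor
  · rintro ⟨k', hk', t', ht', rfl⟩; exact ⟨k', t', hk', ht', rfl⟩
  · rintro ⟨k', t', hk', ht', rfl⟩; exact ⟨k', hk', t', ht', rfl⟩

theorem writesU_succ (N k t : Nat) : writesU N k t ++ [wr N k t] = writesU N k (t + 1) := by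
  simp [writesU, List.range_succ]
theorem writesU_leg (N k : Nat) : writesU N k (N - k) = writesU N (k + 1) 0 := by
  simp [writesU, List.range_succ, legW]
theorem writesU_all (N : Nat) : writesU N N 0 = writesAll N := by
  simp [writesU, writesAll]

-- ---- grid read/write lemmas ----
theorem g2get_set_self (g : List (List Int)) (i j : Int) (v : Int)
    (hi0 : 0 ≤ i) (hi : i.toNat < g.length) (hj0 : 0 ≤ j)
    (hj : j.toNat < (g.getD i.toNat []).length) :
    g2get (g2set g i j v) i j = v := by
  unfold g2get g2set
  have hj' : j.toNat < g[i.toNat].length := by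
    rwa [List.getD_eq_getElem _ _ hi] at hj
  simp [List.getD_eq_getElem?_getD, hi, hj', List.getD_eq_getElem _ _ hi]
theorem g2get_set_other (g : List (List Int)) (i j i' j' : Int) (v : Int)
    (hi0 : 0 ≤ i) (hj0 : 0 ≤ j) (hi0' : 0 ≤ i') (hj0' : 0 ≤ j')
    (hne : ¬(i = i' ∧ j = j')) :
    g2get (g2set g i j v) i' j' = g2get g i' j' := by
  unfold g2get g2set
  by_cases hii : i.toNat = i'.toNat
  · have hij : i = i' := by omega
    have hjne : j ≠ j' := by tauto
    have hjj : j.toNat ≠ j'.toNat := by omega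
    subst hij
    by_cases hlen : i.toNat < g.length
    · simp [List.getD_eq_getElem?_getD, List.getElem?_set_self, hlen, hjj]
    · rw [List.set_eq_of_length_le (by omega)]
  · simp [List.getD_eq_getElem?_getD, List.getElem?_set_ne, hii]

def ShapeS (N : Nat) (g : List (List Int)) : Prop :=
  g.length = N ∧ ∀ row ∈ g, row.length = N
def ShapeJ (N : Nat) (g : List (List Int)) : Prop :=
  g.length = N ∧ ∀ r < N, (g.getD r []).length = r + 1

theorem shape_set (g : List (List Int)) (i j : Int) (v : Int) :
    (g2set g i j v).map List.length = g.map List.length := by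
  unfold g2set
  by_cases hlen : i.toNat < g.length
  · rw [List.map_set]
    apply List.ext_getElem (by simp)
    intro idx h1 h2
    simp only [List.getElem_set]
    split
    · next h => subst h; simp [List.length_set, List.getD_eq_getElem?_getD,
        List.getElem?_eq_getElem hlen]
    · rfl
  · rw [List.set_eq_of_length_le (by omega)]
theorem shapeS_appW (N : Nat) (g : List (List Int)) (w : (Int × Int) × Int)
    (h : ShapeS N g) : ShapeS N (appW g w) := by
  obtain ⟨h1, h2⟩ := h
  have hm : (appW g w).map List.length = g.map List.length := shape_set g _ _ _
  constructor
  · have := congrArg List.length hm; simp only [List.length_map] at this; omega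
  · intro row hrow
    have : row.length ∈ (appW g w).map List.length := List.mem_map_of_mem hrow
    rw [hm] at this
    obtain ⟨row', hrow', hlen⟩ := List.mem_map.mp this
    rw [← hlen]; exact h2 row' hrow'

theorem shapeJ_appW (N : Nat) (g : List (List Int)) (w : (Int × Int) × Int)
    (h : ShapeJ N g) : ShapeJ N (appW g w) := by
  obtain ⟨h1, h2⟩ := h
  have hm : (appW g w).map List.length = g.map List.length := shape_set g _ _ _
  have hl : (appW g w).length = g.length := by
    have := congrArg List.length hm; simpa using this
  refine ⟨by omega, ?_⟩
  intro r hr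
  have hr' : r < (appW g w).length := by omega
  have hg' : r < g.length := by omega
  have e1 : (appW g w).getD r [] = (appW g w)[r] := List.getD_eq_getElem _ _ hr'
  have e2 : g.getD r [] = g[r] := List.getD_eq_getElem _ _ hg'
  have : (appW g w)[r].length = g[r].length := by
    have := congrArg (fun l => l[r]?) hm
    simpa [List.getElem?_map, hr', hg', List.getElem?_eq_getElem] using this
  rw [e1, this, ← e2]; exact h2 r hr

theorem shapeJ_foldW (N : Nat) (g : List (List Int)) (ws : List ((Int × Int) × Int))
    (h : ShapeJ N g) : ShapeJ N (foldW g ws) := by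
  induction ws generalizing g with
  | nil => exact h
  | cons w ws ih => exact ih (appW g w) (shapeJ_appW N g w h)

theorem shapeS_sqG (N : Nat) : ShapeS N (sqG N) := by
  constructor
  · simp [sqG]
  · intro row hrow; simp [sqG] at hrow; simp [hrow]
theorem shapeJ_triG (N : Nat) : ShapeJ N (triG N) := by
  constructor
  · simp [triG]
  · intro r hr
    simp [triG, List.getD_eq_getElem?_getD, List.getElem?_map,
          List.getElem?_range, hr]

theorem getD_all_zero (l : List Int) (h : ∀ x ∈ l, x = 0) (n : Nat) : l.getD n 0 = 0 := by
  by_cases hn : n < l.length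
  · rw [List.getD_eq_getElem _ _ hn]; exact h _ (l.getElem_mem hn)
  · rw [List.getD_eq_default _ _ (by omega)]

theorem g2get_zero_rows (g : List (List Int)) (hg : ∀ row ∈ g, ∀ x ∈ row, x = 0)
    (i j : Int) : g2get g i j = 0 := by
  unfold g2get
  apply getD_all_zero
  intro x hx
  by_cases hi : i.toNat < g.length
  · rw [List.getD_eq_getElem _ _ hi] at hx
    exact hg _ (g.getElem_mem hi) x hx
  · rw [List.getD_eq_default _ _ (by omega)] at hx; simp at hx

theorem g2get_sqG (N : Nat) (i j : Int) : g2get (sqG N) i j = 0 := by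
  apply g2get_zero_rows
  intro row hrow x hx
  have hr2 : row = List.replicate N (0 : Int) :=
    List.eq_of_mem_replicate (by simpa [sqG] using hrow)
  rw [hr2] at hx
  exact List.eq_of_mem_replicate hx

theorem g2get_triG (N : Nat) (i j : Int) : g2get (triG N) i j = 0 := by
  apply g2get_zero_rows
  intro row hrow x hx
  simp only [triG, List.mem_map, List.mem_range] at hrow
  obtain ⟨r, _, rfl⟩ := hrow
  exact List.eq_of_mem_replicate hx
-- reads of an unwritten cell
theorem foldW_not_mem (g : List (List Int)) (ws : List ((Int × Int) × Int)) (i j : Int)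
    (hi : 0 ≤ i) (hj : 0 ≤ j)
    (hw : ∀ w ∈ ws, 0 ≤ w.1.1 ∧ 0 ≤ w.1.2)
    (hne : ∀ w ∈ ws, w.1 ≠ (i, j)) :
    g2get (foldW g ws) i j = g2get g i j := by
  induction ws generalizing g with
  | nil => rfl
  | cons w ws ih =>
    have step : g2get (appW g w) i j = g2get g i j := by
      apply g2get_set_other
      · exact (hw w (by simp)).1
      · exact (hw w (by simp)).2
      · exact hi
      · exact hj
      · intro ⟨e1, e2⟩
        exact hne w (by simp) (by simp [Prod.ext_iff, e1, e2])
    calc g2get (foldW (appW g w) ws) i j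
        = g2get (appW g w) i j := ih (appW g w) (fun w' h' => hw w' (by simp [h']))
          (fun w' h' => hne w' (by simp [h']))
      _ = g2get g i j := step

-- a written cell is nonzero (writes in range, positive values)
theorem foldW_mem_pos (N : Nat) (g : List (List Int)) (ws : List ((Int × Int) × Int)) (i j : Int)
    (hg : ShapeS N g)
    (hw : ∀ w ∈ ws, (0 ≤ w.1.1 ∧ w.1.1 < (N : Int)) ∧ (0 ≤ w.1.2 ∧ w.1.2 < (N : Int)) ∧ 0 < w.2)
    (hmem : (i, j) ∈ ws.map Prod.fst) :
    0 < g2get (foldW g ws) i j := by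
  induction ws generalizing g with
  | nil => simp at hmem
  | cons w ws ih =>
    by_cases htail : (i, j) ∈ ws.map Prod.fst
    · exact ih (appW g w) (shapeS_appW N g w hg) (fun w' h' => hw w' (by simp [h'])) htail
    · have hhead : w.1 = (i, j) := by
        simp only [List.map_cons, List.mem_cons] at hmem
        rcases hmem with h | h
        · exact h.symm
        · exact absurd h htail
      obtain ⟨⟨wi, wj⟩, wv⟩ := w
      simp only [Prod.mk.injEq] at hhead
      obtain ⟨rfl, rfl⟩ := hhead
      obtain ⟨⟨hwi0, hwiN⟩, ⟨hwj0, hwjN⟩, hwv⟩ := hw ⟨(wi, wj), wv⟩ (by simp)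
      dsimp only at hwi0 hwiN hwj0 hwjN hwv
      have hnot : ∀ w' ∈ ws, w'.1 ≠ (wi, wj) := by
        intro w' h' he
        exact htail (he ▸ List.mem_map_of_mem (f := Prod.fst) h')
      have hgl : g.length = N := hg.1
      have hrow : (g.getD wi.toNat []).length = N := by
        have hlt : wi.toNat < g.length := by omega
        rw [List.getD_eq_getElem _ _ hlt]
        exact hg.2 _ (g.getElem_mem hlt)
      have hstep : g2get (appW g ((wi, wj), wv)) wi wj = wv := by
        exact g2get_set_self g wi wj wv hwi0 (by omega) hwj0 (by rw [hrow]; omega)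
      calc 0 < wv := hwv
        _ = g2get (appW g ((wi, wj), wv)) wi wj := hstep.symm
        _ = g2get (foldW (appW g ((wi, wj), wv)) ws) wi wj := by
              rw [foldW_not_mem _ ws wi wj hwi0 hwj0
                (fun w' h' => ⟨((hw w' (by simp [h'])).1).1, ((hw w' (by simp [h'])).2).1.1⟩)
                hnot]
-- square grid and jagged triangle agree on triangle cells after the same writes
theorem foldW_cross (N : Nat) (gS gJ : List (List Int)) (ws : List ((Int × Int) × Int))
    (hS : ShapeS N gS) (hJ : ShapeJ N gJ)
    (hw : ∀ w ∈ ws, 0 ≤ w.1.2 ∧ w.1.2 ≤ w.1.1 ∧ w.1.1 < (N : Int))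
    (heq : ∀ r c : Int, 0 ≤ c → c ≤ r → r < (N : Int) → g2get gS r c = g2get gJ r c) :
    ∀ r c : Int, 0 ≤ c → c ≤ r → r < (N : Int) →
      g2get (foldW gS ws) r c = g2get (foldW gJ ws) r c := by
  induction ws generalizing gS gJ with
  | nil => exact heq
  | cons w ws ih =>
    refine ih (appW gS w) (appW gJ w) (shapeS_appW N gS w hS) (shapeJ_appW N gJ w hJ)
      (fun w' h' => hw w' (by simp [h'])) ?_
    intro r c hc hcr hr
    obtain ⟨hwj0, hwji, hwiN⟩ := hw w (by simp)
    have hwj0' : (0 : Int) ≤ w.1.1 := by omega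
    have hSlen : gS.length = N := hS.1
    have hJlen : gJ.length = N := hJ.1
    by_cases hcell : w.1 = (r, c)
    · have e1 : w.1.1 = r := by rw [hcell]
      have e2 : w.1.2 = c := by rw [hcell]
      have hSrow : (gS.getD r.toNat []).length = N := by
        have hlt : r.toNat < gS.length := by omega
        rw [List.getD_eq_getElem _ _ hlt]
        exact hS.2 _ (gS.getElem_mem hlt)
      have hJrow : (gJ.getD r.toNat []).length = r.toNat + 1 := hJ.2 r.toNat (by omega)
      have eS : g2get (appW gS w) r c = w.2 := by
        rw [show appW gS w = g2set gS r c w.2 by rw [appW, e1, e2]]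
        exact g2get_set_self gS r c w.2 (by omega) (by omega) hc (by rw [hSrow]; omega)
      have eJ : g2get (appW gJ w) r c = w.2 := by
        rw [show appW gJ w = g2set gJ r c w.2 by rw [appW, e1, e2]]
        refine g2get_set_self gJ r c w.2 (by omega) (by omega) hc ?_
        rw [hJrow]; omega
      rw [eS, eJ]
    · have eS : g2get (appW gS w) r c = g2get gS r c :=
        g2get_set_other gS w.1.1 w.1.2 r c w.2 hwj0' hwj0 (by omega) hc
          (by intro ⟨a, b⟩; exact hcell (by simp [Prod.ext_iff, a, b]))
      have eJ : g2get (appW gJ w) r c = g2get gJ r c :=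
        g2get_set_other gJ w.1.1 w.1.2 r c w.2 hwj0' hwj0 (by omega) hc
          (by intro ⟨a, b⟩; exact hcell (by simp [Prod.ext_iff, a, b]))
      rw [eS, eJ]; exact heq r c hc hcr hr

-- all writes are at triangle cells with positive values
theorem writesAll_ok (N : Nat) (w : (Int × Int) × Int) (hw : w ∈ writesAll N) :
    (0 ≤ w.1.2 ∧ w.1.2 ≤ w.1.1 ∧ w.1.1 < (N : Int)) ∧ 0 < w.2 := by
  rw [mem_writesAll] at hw
  obtain ⟨k', t', hk', ht', rfl⟩ := hw
  have hb := cell_bounds N k' t' hk' ht'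
  refine ⟨⟨hb.1, hb.2.1, hb.2.2⟩, ?_⟩
  show (0 : Int) < (cb N k' + t' + 1 : Int)
  positivity
theorem writesU_ok (N k t : Nat) (hk : k ≤ N) (ht : t ≤ N - k) (w : (Int × Int) × Int)
    (hw : w ∈ writesU N k t) :
    (0 ≤ w.1.2 ∧ w.1.2 ≤ w.1.1 ∧ w.1.1 < (N : Int)) ∧ 0 < w.2 := by
  rw [mem_writesU] at hw
  obtain ⟨k', t', hcase, rfl⟩ := hw
  have hkt : k' < N ∧ t' < N - k' := by omega
  have hb := cell_bounds N k' t' hkt.1 hkt.2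
  refine ⟨⟨hb.1, hb.2.1, hb.2.2⟩, ?_⟩
  show (0 : Int) < (cb N k' + t' + 1 : Int)
  positivity

-- ---- A-side simulation ----
theorem tryOk_iff (arr : List (List Int)) (n ni nj : Int) (d : Nat) :
    tryOk arr n ni nj d = true ↔
      (0 ≤ ni + deltaI d ∧ ni + deltaI d < n ∧ 0 ≤ nj + deltaJ d ∧ nj + deltaJ d < n ∧
       g2get arr (ni + deltaI d) (nj + deltaJ d) = 0) := by
  simp [tryOk, and_assoc]

theorem innerA_spec (arr : List (List Int)) (n ni nj : Int) (d fuel : Nat)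
    (ni' nj' : Int) (d' : Nat)
    (h : innerA arr n ni nj d fuel = some (ni', nj', d')) :
    0 ≤ ni' ∧ ni' < n ∧ 0 ≤ nj' ∧ nj' < n ∧ g2get arr ni' nj' = 0 := by
  induction fuel generalizing d with
  | zero => simp [innerA] at h
  | succ f ih =>
    rw [innerA] at h
    by_cases ht : tryOk arr n ni nj d = true
    · rw [if_pos ht] at h
      obtain ⟨e1, e2, e3⟩ : ni + deltaI d = ni' ∧ nj + deltaJ d = nj' ∧ d = d' := by
        simpa using h
      rw [tryOk_iff] at ht
      refine ⟨by omega, by omega, by omega, by omega, ?_⟩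
      rw [← e1, ← e2]; exact ht.2.2.2.2
    · rw [if_neg ht] at h
      exact ih _ h

-- once the triangle is complete and the walker stands strictly above the diagonal,
-- the rest of A's loop never changes a triangle cell
theorem loopA_wander (N : Nat) (fuel : Nat) :
    ∀ (arr : List (List Int)) (ni nj : Int) (d : Nat) (num : Int),
    (∀ r c : Int, 0 ≤ c → c ≤ r → r < (N : Int) → g2get arr r c ≠ 0) →
    0 ≤ ni → ni < (N : Int) → 0 ≤ nj → nj < (N : Int) → ni < nj →
    ∀ r c : Int, 0 ≤ c → c ≤ r → r < (N : Int) →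
      g2get (loopA (N : Int) fuel arr ni nj d num) r c = g2get arr r c := by
  induction fuel with
  | zero => intro arr ni nj d num _ _ _ _ _ _ r c _ _ _; rfl
  | succ f ih =>
    intro arr ni nj d num hfull hni0 hniN hnj0 hnjN hij r c hc hcr hr
    rw [loopA]
    have hset : ∀ r' c' : Int, 0 ≤ c' → c' ≤ r' → r' < (N : Int) →
        g2get (g2set arr ni nj num) r' c' = g2get arr r' c' := by
      intro r' c' hc' hcr' hr'
      exact g2get_set_other arr ni nj r' c' num hni0 hnj0 (by omega) hc'
        (by intro ⟨a, b⟩; omega)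
    rcases hspec : innerA (g2set arr ni nj num) (N : Int) ni nj d 3 with _ | ⟨ni', nj', d'⟩
    · simp only []
      exact hset r c hc hcr hr
    · simp only []
      obtain ⟨h1, h2, h3, h4, h5⟩ := innerA_spec _ _ _ _ _ _ _ _ _ hspec
      have hup : ni' < nj' := by
        by_contra hle
        have htri : g2get (g2set arr ni nj num) ni' nj' ≠ 0 := by
          rw [hset ni' nj' h3 (by omega) h2]
          exact hfull ni' nj' h3 (by omega) h2
        exact htri h5
      have := ih (g2set arr ni nj num) ni' nj' d' (num + 1)
        (fun r' c' hc' hcr' hr' => by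
          rw [hset r' c' hc' hcr' hr']; exact hfull r' c' hc' hcr' hr')
        h1 h2 h3 h4 hup r c hc hcr hr
      rw [this]
      exact hset r c hc hcr hr

theorem not_mem_writesU (N k t k2 t2 : Nat) (hk2 : k2 < N) (ht2 : t2 < N - k2)
    (htN : t ≤ N - k) (hlex : k < k2 ∨ (k = k2 ∧ t ≤ t2)) :
    (cellI N k2 t2, cellJ N k2 t2) ∉ (writesU N k t).map Prod.fst := by
  intro hmem
  obtain ⟨w, hw, he⟩ := List.mem_map.mp hmem
  rw [mem_writesU] at hw
  obtain ⟨k', t', hcase, rfl⟩ := hw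
  have hkt' : k' < N ∧ t' < N - k' := by omega
  obtain ⟨e1, e2⟩ : cellI N k' t' = cellI N k2 t2 ∧ cellJ N k' t' = cellJ N k2 t2 := by
    constructor
    · exact congrArg Prod.fst he
    · exact congrArg Prod.snd he
  obtain ⟨rfl, rfl⟩ := cell_inj N k' t' k2 t2 hkt'.1 hkt'.2 hk2 ht2 e1 e2
  omega

theorem read_zero (N k t k2 t2 : Nat) (hk2 : k2 < N) (ht2 : t2 < N - k2)
    (hkN : k ≤ N) (htN : t ≤ N - k) (hlex : k < k2 ∨ (k = k2 ∧ t ≤ t2)) :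
    g2get (foldW (sqG N) (writesU N k t)) (cellI N k2 t2) (cellJ N k2 t2) = 0 := by
  have hb := cell_bounds N k2 t2 hk2 ht2
  rw [foldW_not_mem _ _ _ _ (by omega) hb.1
    (fun w hw => by
      have := (writesU_ok N k t hkN htN w hw).1
      exact ⟨by omega, this.1⟩)
    (fun w hw he => not_mem_writesU N k t k2 t2 hk2 ht2 htN hlex
      (he ▸ List.mem_map_of_mem (f := Prod.fst) hw))]
  exact g2get_sqG N _ _

theorem read_pos (N k t k2 t2 : Nat) (hk2 : k2 < N) (ht2 : t2 < N - k2)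
    (hkN : k ≤ N) (htN : t ≤ N - k) (hlex : k2 < k ∨ (k2 = k ∧ t2 < t)) :
    0 < g2get (foldW (sqG N) (writesU N k t)) (cellI N k2 t2) (cellJ N k2 t2) := by
  apply foldW_mem_pos N _ _ _ _ (shapeS_sqG N)
    (fun w hw => by
      have h := writesU_ok N k t hkN htN w hw
      exact ⟨⟨by omega, by omega⟩, ⟨h.1.1, by omega⟩, h.2⟩)
  apply List.mem_map_of_mem (f := Prod.fst)
    (a := wr N k2 t2)
  rw [mem_writesU]
  exact ⟨k2, t2, by omega, rfl⟩

-- every triangle cell of the finished grid is nonzero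
theorem full_nonzero (N : Nat) (r c : Int) (hc : 0 ≤ c) (hcr : c ≤ r) (hr : r < (N : Int)) :
    g2get (foldW (sqG N) (writesAll N)) r c ≠ 0 := by
  obtain ⟨k, t, hk, ht, e1, e2⟩ := cell_cover N r c hc hcr hr
  rw [← e1, ← e2, ← writesU_all]
  have := read_pos N N 0 k t hk ht (le_refl N) (by omega) (by omega)
  omega

theorem loopA_sim (N : Nat) (hN : 1 ≤ N) (fuel : Nat) :
    ∀ k t, k < N → t < N - k → cb N N + 1 ≤ cb N k + t + fuel →
    ∀ r c : Int, 0 ≤ c → c ≤ r → r < (N : Int) →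
      g2get (loopA (N : Int) fuel (foldW (sqG N) (writesU N k t))
              (cellI N k t) (cellJ N k t) (k % 3) ((cb N k : Int) + (t : Int) + 1)) r c
        = g2get (foldW (sqG N) (writesAll N)) r c := by
  induction fuel with
  | zero =>
    intro k t hk ht hfuel
    exfalso
    have := cb_lt_total N k t hk ht
    omega
  | succ f ih =>
    intro k t hk ht hfuel r c hc hcr hr
    rw [loopA]
    have harr1 : g2set (foldW (sqG N) (writesU N k t)) (cellI N k t) (cellJ N k t)
        ((cb N k : Int) + (t : Int) + 1) = foldW (sqG N) (writesU N k (t + 1)) := by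
      rw [← writesU_succ]
      unfold foldW
      rw [List.foldl_append]
      rfl
    have hdnext : (if k % 3 + 1 < 3 then k % 3 + 1 else 0) = (k + 1) % 3 := by
      split <;> omega
    by_cases hcase : t + 1 < N - k
    · -- mid-leg: first probe succeeds, move one step along the leg
      have hstep := cell_step N k t
      have hb2 := cell_bounds N k (t + 1) hk hcase
      have htry : tryOk (foldW (sqG N) (writesU N k (t + 1))) (N : Int)
          (cellI N k t) (cellJ N k t) (k % 3) = true := by
        rw [tryOk_iff, deltaI_mod, deltaJ_mod, ← hstep.1, ← hstep.2]
        exact ⟨by omega, by omega, by omega, by omega,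
          read_zero N k (t + 1) k (t + 1) hk hcase (by omega) (by omega) (by omega)⟩
      rw [harr1, innerA, if_pos htry, deltaI_mod, deltaJ_mod, ← hstep.1, ← hstep.2]
      have := ih k (t + 1) hk hcase (by omega) r c hc hcr hr
      rw [show ((cb N k : Int) + (t : Int) + 1) + 1 = (cb N k : Int) + ((t + 1 : Nat) : Int) + 1
        by push_cast; ring]
      exact this
    · -- leg end: t + 1 = N - k
      have htend : t = N - k - 1 := by omega
      subst htend
      have hfail : ¬ (tryOk (foldW (sqG N) (writesU N k (N - k - 1 + 1))) (N : Int)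
          (cellI N k (N - k - 1)) (cellJ N k (N - k - 1)) (k % 3) = true) := by
        rw [tryOk_iff, deltaI_mod, deltaJ_mod]
        rintro ⟨c1, c2, c3, c4, c5⟩
        by_cases hk2 : 2 ≤ k
        · have hov := cell_overshoot N k hk2 hk
          rw [← hov.1, ← hov.2] at c5
          have := read_pos N k (N - k - 1 + 1) (k - 2) 0 (by omega) (by omega)
            (by omega) (by omega) (by omega)
          omega
        · have h01 : k = 0 ∨ k = 1 := by omega
          rcases h01 with rfl | rfl
          · simp [cellI, dI] at c2; omega
          · simp [cellJ, dJ] at c4; omega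
      by_cases hlast : k + 1 < N
      · -- turn: second probe succeeds into leg k+1
        have hleg := cell_leg_step N k hk
        have hb2 := cell_bounds N (k + 1) 0 hlast (by omega)
        have htry2 : tryOk (foldW (sqG N) (writesU N k (N - k - 1 + 1))) (N : Int)
            (cellI N k (N - k - 1)) (cellJ N k (N - k - 1)) ((k + 1) % 3) = true := by
          rw [tryOk_iff, deltaI_mod, deltaJ_mod, ← hleg.1, ← hleg.2]
          refine ⟨by omega, by omega, by omega, by omega, ?_⟩
          rw [show N - k - 1 + 1 = N - k by omega, writesU_leg]
          exact read_zero N (k + 1) 0 (k + 1) 0 hlast (by omega) (by omega) (by omega)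
            (by omega)
        rw [harr1, innerA, if_neg hfail, hdnext, innerA, if_pos htry2,
            deltaI_mod, deltaJ_mod, ← hleg.1, ← hleg.2]
        have hnum : ((cb N k : Int) + ((N - k - 1 : Nat) : Int) + 1) + 1
            = (cb N (k + 1) : Int) + ((0 : Nat) : Int) + 1 := by
          rw [cb_succ]; push_cast; omega
        rw [show N - k - 1 + 1 = N - k by omega, writesU_leg, hnum]
        exact ih (k + 1) 0 hlast (by omega) (by rw [cb_succ]; omega) r c hc hcr hr
      · -- last cell of the last leg: triangle complete; rest of the walk cannot touch it
        have hall : writesU N k (N - k - 1 + 1) = writesAll N := by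
          rw [show N - k - 1 + 1 = N - k by omega, writesU_leg, show k + 1 = N by omega,
              writesU_all]
        rw [harr1, hall]
        rcases hspec : innerA (foldW (sqG N) (writesAll N)) (N : Int)
            (cellI N k (N - k - 1)) (cellJ N k (N - k - 1)) (k % 3) 3 with _ | ⟨ni', nj', d'⟩
        · rfl
        · obtain ⟨h1, h2, h3, h4, h5⟩ := innerA_spec _ _ _ _ _ _ _ _ _ hspec
          have hup : ni' < nj' := by
            by_contra hle
            exact full_nonzero N ni' nj' h3 (by omega) h2 h5
          exact loopA_wander N f (foldW (sqG N) (writesAll N)) ni' nj' d' _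
            (fun r' c' hc' hcr' hr' => full_nonzero N r' c' hc' hcr' hr')
            h1 h2 h3 h4 hup r c hc hcr hr

theorem loopB_inner (L : Nat) (di dj : Int) :
    ∀ (tri : List (List Int)) (i j num : Int),
    (List.range L).foldl
      (fun (s : List (List Int) × Int × Int × Int) _ =>
        let (tri, i, j, num) := s
        (g2set tri i j num, i + di, j + dj, num + 1)) (tri, i, j, num)
      = (foldW tri ((List.range L).map
            (fun t : Nat => ((i + (t : Int) * di, j + (t : Int) * dj), num + (t : Int)))),
         i + L * di, j + L * dj, num + L) := by
  induction L with
  | zero => intro tri i j num; simp [foldW]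
  | succ L ih =>
    intro tri i j num
    rw [List.range_succ, List.foldl_append, ih]
    simp only [List.foldl_cons, List.foldl_nil]
    rw [List.map_append]
    simp only [foldW, List.map_cons, List.map_nil, List.foldl_append,
      List.foldl_cons, List.foldl_nil, appW]
    simp only [Prod.mk.injEq, true_and]
    refine ⟨by push_cast; ring, by push_cast; ring, by push_cast; ring⟩

theorem dirs_getD (m : Nat) :
    ([((1:Int), (0:Int)), (0, 1), (-1, -1)] : List (Int × Int)).getD (m % 3) (0, 0)
      = (dI m, dJ m) := by
  have h3 : m % 3 = 0 ∨ m % 3 = 1 ∨ m % 3 = 2 := by omega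
  rcases h3 with h|h|h <;> rw [h] <;> simp [dI, dJ, h]

theorem cell_from_start (N k t : Nat) :
    cellI N k t = cellI N k 0 + t * dI k ∧ cellJ N k t = cellJ N k 0 + t * dJ k := by
  have h3 : k % 3 = 0 ∨ k % 3 = 1 ∨ k % 3 = 2 := by omega
  rcases h3 with h|h|h <;> simp [cellI, cellJ, dI, dJ, h] <;> omega

theorem wr_from_start (N k t : Nat) :
    wr N k t = ((cellI N k 0 + (t : Int) * dI k, cellJ N k 0 + (t : Int) * dJ k),
                ((cb N k : Int) + 1) + (t : Int)) := by
  obtain ⟨e1, e2⟩ := cell_from_start N k t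
  simp [wr, e1, e2]; ring

theorem writesU_snoc_leg (N k : Nat) :
    writesU N k 0 ++ legW N k = writesU N (k + 1) 0 := by
  simp [writesU, List.range_succ]

theorem loopB_outer (N : Nat) : ∀ k, k ≤ N →
    (List.range k).foldl
      (fun (s : List (List Int) × Int × Int × Int) k =>
        let (tri, i, j, num) := s
        let dd := ([((1:Int), (0:Int)), (0, 1), (-1, -1)] : List (Int × Int)).getD (k % 3) (0, 0)
        let s2 := (List.range (N - k)).foldl
          (fun (s : List (List Int) × Int × Int × Int) _ =>
            let (tri, i, j, num) := s
            (g2set tri i j num, i + dd.1, j + dd.2, num + 1)) (tri, i, j, num)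
        let (tri, i, j, num) := s2
        let dd2 := ([((1:Int), (0:Int)), (0, 1), (-1, -1)] : List (Int × Int)).getD ((k + 1) % 3) (0, 0)
        (tri, i + dd2.1 - dd.1, j + dd2.2 - dd.2, num)) (triG N, 0, 0, 1)
    = (foldW (triG N) (writesU N k 0), cellI N k 0, cellJ N k 0, (cb N k : Int) + 1) := by
  intro k
  induction k with
  | zero =>
    intro _
    simp [writesU, foldW, cellI, cellJ, cb]
  | succ k ih =>
    intro hk1
    rw [List.range_succ, List.foldl_append, ih (by omega)]
    simp only [List.foldl_cons, List.foldl_nil, dirs_getD]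
    rw [loopB_inner]
    have hmap : (List.range (N - k)).map
        (fun t : Nat => ((cellI N k 0 + (t : Int) * (dI k, dJ k).1,
                          cellJ N k 0 + (t : Int) * (dI k, dJ k).2),
                         ((cb N k : Int) + 1) + (t : Int)))
        = legW N k := by
      apply List.map_congr_left
      intro t _
      rw [wr_from_start N k t]
    rw [hmap]
    dsimp only
    have hfold : foldW (foldW (triG N) (writesU N k 0)) (legW N k)
        = foldW (triG N) (writesU N (k + 1) 0) := by
      rw [foldW, foldW, foldW, ← List.foldl_append, writesU_snoc_leg]
    obtain ⟨e1, e2⟩ := cell_leg_step N k (by omega)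
    obtain ⟨f1, f2⟩ := cell_from_start N k (N - k - 1)
    have hNk : ((N - k : Nat) : Int) = ((N - k - 1 : Nat) : Int) + 1 := by omega
    simp only [Prod.mk.injEq]
    refine ⟨hfold, ?_, ?_, ?_⟩
    · rw [hNk]; linear_combination -e1 - f1
    · rw [hNk]; linear_combination -e2 - f2
    · rw [cb_succ]; push_cast; omega

theorem solution_alt_eq (n : Int) :
    solution_alt n = (foldW (triG n.toNat) (writesAll n.toNat)).flatMap (fun row => row) := by
  have h := loopB_outer n.toNat n.toNat (le_refl _)
  rw [writesU_all] at h
  show ((List.range n.toNat).foldl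
      (fun (s : List (List Int) × Int × Int × Int) k =>
        let (tri, i, j, num) := s
        let dd := ([((1:Int), (0:Int)), (0, 1), (-1, -1)] : List (Int × Int)).getD (k % 3) (0, 0)
        let s2 := (List.range (n.toNat - k)).foldl
          (fun (s : List (List Int) × Int × Int × Int) _ =>
            let (tri, i, j, num) := s
            (g2set tri i j num, i + dd.1, j + dd.2, num + 1)) (tri, i, j, num)
        let (tri, i, j, num) := s2
        let dd2 := ([((1:Int), (0:Int)), (0, 1), (-1, -1)] : List (Int × Int)).getD ((k + 1) % 3) (0, 0)
        (tri, i + dd2.1 - dd.1, j + dd2.2 - dd.2, num)) (triG n.toNat, 0, 0, 1)).1.flatMap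
      (fun row => row)
      = (foldW (triG n.toNat) (writesAll n.toNat)).flatMap (fun row => row)
  rw [h]

-- flattening a jagged triangle = reading it cell by cell
theorem flat_read (N : Nat) (g : List (List Int)) (h : ShapeJ N g) :
    g.flatMap (fun row => row)
      = (List.range N).flatMap
          (fun r : Nat => (List.range (r + 1)).map (fun c : Nat => g2get g (r : Int) (c : Int))) := by
  obtain ⟨hlen, hrow⟩ := h
  have hg : g = (List.range N).map
      (fun r => (List.range (r + 1)).map (fun c : Nat => g2get g r c)) := by
    apply List.ext_getElem (by simp [hlen])
    intro idx h1 h2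
    have hidx : idx < N := by omega
    have hgetD : g.getD idx [] = g[idx] := List.getD_eq_getElem _ _ (by omega)
    have hrl : g[idx].length = idx + 1 := by rw [← hgetD]; exact hrow idx hidx
    simp only [List.getElem_map, List.getElem_range]
    apply List.ext_getElem (by simp [hrl])
    intro c hc1 hc2
    simp only [List.getElem_map, List.getElem_range]
    unfold g2get
    rw [Int.toNat_natCast, Int.toNat_natCast, hgetD,
        List.getD_eq_getElem _ _ (by omega)]
  conv_lhs => rw [hg]
  rw [List.flatMap_map]

-- ===== VERDICT (by name: the statement is the Claim_ definition above) =====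
theorem solution_spec : Claim_equal_solution := by
  unfold Claim_equal_solution Spec_solution
  intro n _ hpre
  unfold Pre_solution at hpre
  obtain ⟨N, rfl⟩ : ∃ N : Nat, n = (N : Int) := ⟨n.toNat, by omega⟩
  have hN : 1 ≤ N := by exact_mod_cast hpre
  have hsim := loopA_sim N hN (N * N + 1) 0 0 (by omega) (by omega)
    (by have := cb_le N N (le_refl N); simp [cb]; omega)
  simp only [Nat.zero_mod] at hsim
  have eci : cellI N 0 0 = 0 := by simp [cellI]
  have ecj : cellJ N 0 0 = 0 := by simp [cellJ]
  have enum : ((cb N 0 : Int) + ((0 : Nat) : Int) + 1) = 1 := by norm_num [cb]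
  have efold : foldW (sqG N) (writesU N 0 0) = sqG N := rfl
  rw [eci, ecj, enum, efold] at hsim
  -- hsim : ∀ r c triangle, g2get (loopA ↑N (N*N+1) (sqG N) 0 0 0 1) r c = final reads
  rw [solution_alt_eq, Int.toNat_natCast,
      flat_read N _ (shapeJ_foldW N _ _ (shapeJ_triG N))]
  unfold solution
  simp only [Int.toNat_natCast]
  rw [List.flatMap_def, List.flatMap_def]
  congr 1
  apply List.map_congr_left
  intro r hr
  apply List.map_congr_left
  intro c hcm
  have hrN : r < N := List.mem_range.mp hr
  have hcr : c < r + 1 := List.mem_range.mp hcm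
  have hc0 : (0 : Int) ≤ (c : Int) := by positivity
  have hcr' : (c : Int) ≤ (r : Int) := by exact_mod_cast Nat.lt_succ_iff.mp hcr
  have hrN' : (r : Int) < (N : Int) := by exact_mod_cast hrN
  rw [show (List.replicate N (List.replicate N (0 : Int))) = sqG N from rfl]
  rw [hsim r c hc0 hcr' hrN']
  exact foldW_cross N (sqG N) (triG N) (writesAll N) (shapeS_sqG N) (shapeJ_triG N)
    (fun w hw => (writesAll_ok N w hw).1)
    (fun r' c' _ _ _ => by rw [g2get_sqG, g2get_triG])
    r c hc0 hcr' hrN' 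

def solution_raises : Claim_raises_solution := by
  unfold Claim_raises_solution
  exact ⟨by intro n _ h hp; unfold Raises_solution at h; unfold Pre_solution at hp; omega,
         by decide⟩
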